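-- pv_equiv track=rewrite | github.com/waaseyaalabs/elden-botany-corpus | src/pipelines/io/carian_fmg_loader.py | _normalize_fmg_text
-- ===== SOURCE A (Python) =====
-- def _normalize_fmg_text(value: str) -> str:
--     stripped_lines: list[str] = []
--     blank_pending = False
--     for line in value.splitlines():
--         cleaned = line.strip()
--         if not cleaned:
--             if stripped_lines and not blank_pending:
--                 blank_pending = True
--             continue
--         if blank_pending:
--             stripped_lines.append("")
--             blank_pending = False
--         stripped_lines.append(cleaned)
--     text = "\n".join(stripped_lines).strip()
--     return text
-- ===== SOURCE B (Python) =====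
-- def _normalize_fmg_text(value: str) -> str:
--     lines = [line.strip() for line in value.splitlines()]
--     paragraphs: list[str] = []
--     current: list[str] = []
--     for line in lines:
--         if line:
--             current.append(line)
--         elif current:
--             paragraphs.append("\n".join(current))
--             current = []
--     if current:
--         paragraphs.append("\n".join(current))
--     return "\n\n".join(paragraphs)
-- ===== Notes on version B (the rewrite author's own statement) =====
-- stated objective: idiomatic
-- what changed: Replaces A's stateful blank_pending single pass plus final strip with a paragraph-grouping decomposition: strip all lines, group consecutive non-blank lines into paragraphs, and join paragraphs with a blank line.
import Mathlib
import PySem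

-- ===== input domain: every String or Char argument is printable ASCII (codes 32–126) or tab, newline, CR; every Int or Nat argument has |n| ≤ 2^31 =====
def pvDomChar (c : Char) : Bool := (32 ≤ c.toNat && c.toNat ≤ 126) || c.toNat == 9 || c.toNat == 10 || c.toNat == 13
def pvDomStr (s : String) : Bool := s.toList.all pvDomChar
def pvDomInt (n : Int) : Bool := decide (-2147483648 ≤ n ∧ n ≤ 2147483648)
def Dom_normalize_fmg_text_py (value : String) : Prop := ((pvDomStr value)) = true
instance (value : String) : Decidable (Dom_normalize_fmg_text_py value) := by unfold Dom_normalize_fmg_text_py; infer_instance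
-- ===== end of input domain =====

-- B replaces A's stateful blank_pending single pass (plus final strip) with a paragraph-grouping
-- decomposition: strip all lines, group consecutive non-blank lines into paragraphs, join with blank lines (objective: idiomatic).

-- ===== PORT A =====
-- loop body of A: state = (stripped_lines, blank_pending)
def pvStepA (st : List (List Char) × Bool) (line : String) : List (List Char) × Bool :=
  let cleaned := PySem.Chars.strip line.toList
  if cleaned.isEmpty then
    (if !st.1.isEmpty && !st.2 then (st.1, true) else st)
  else
    ((if st.2 then st.1 ++ [[]] else st.1) ++ [cleaned], false)

def normalize_fmg_text_py (value : String) : String :=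
  let st := (PySem.Str.splitlines value).foldl pvStepA ([], false)
  String.ofList (PySem.Chars.strip (PySem.Chars.join ['\n'] st.1))

-- ===== PORT B =====
-- loop body of B: state = (paragraphs, current)
def pvStepB (st : List (List Char) × List (List Char)) (line : List Char) :
    List (List Char) × List (List Char) :=
  if !line.isEmpty then (st.1, st.2 ++ [line])
  else if !st.2.isEmpty then (st.1 ++ [PySem.Chars.join ['\n'] st.2], [])
  else st

def normalize_fmg_text_py_alt (value : String) : String :=
  let lines := (PySem.Str.splitlines value).map (fun line => PySem.Chars.strip line.toList)
  let st := lines.foldl pvStepB ([], [])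
  let paragraphs := if st.2.isEmpty then st.1 else st.1 ++ [PySem.Chars.join ['\n'] st.2]
  String.ofList (PySem.Chars.join ['\n', '\n'] paragraphs)

-- ===== PRECONDITION & SPEC =====
def Spec_normalize_fmg_text_py (value : String) (out : String) : Prop := out = normalize_fmg_text_py_alt value
instance (value : String) (out : String) : Decidable (Spec_normalize_fmg_text_py value out) := by unfold Spec_normalize_fmg_text_py; infer_instance

-- ===== CLAIM (what is proved, stated in full; the proofs are below) =====
def Claim_equal_normalize_fmg_text_py : Prop := ∀ (value : String), Dom_normalize_fmg_text_py value → Spec_normalize_fmg_text_py value (normalize_fmg_text_py value)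

-- ===== LEMMAS AND PROOFS =====

-- A's loop body applied to the already-stripped line
def pvSA (st : List (List Char) × Bool) (c : List Char) : List (List Char) × Bool :=
  if c.isEmpty then
    (if !st.1.isEmpty && !st.2 then (st.1, true) else st)
  else
    ((if st.2 then st.1 ++ [[]] else st.1) ++ [c], false)

-- what A's loop appends after the first non-blank line, given the pending flag
def pvA : List (List Char) → Bool → List (List Char)
  | [], _ => []
  | l :: ls, p =>
      if l.isEmpty then pvA ls true
      else (if p then [[]] else []) ++ l :: pvA ls false

-- A's stripped_lines from the initial state
def pvA0 : List (List Char) → List (List Char)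
  | [] => []
  | l :: ls => if l.isEmpty then pvA0 ls else l :: pvA ls false

-- the paragraphs B appends, given the current open paragraph
def pvB : List (List Char) → List (List Char) → List (List Char)
  | [], cur => if cur.isEmpty then [] else [PySem.Chars.join ['\n'] cur]
  | l :: ls, cur =>
      if l.isEmpty then
        (if cur.isEmpty then pvB ls [] else PySem.Chars.join ['\n'] cur :: pvB ls [])
      else pvB ls (cur ++ [l])

theorem pvFoldA_ne (ls : List (List Char)) (acc : List (List Char)) (p : Bool)
    (h : acc ≠ []) : (ls.foldl pvSA (acc, p)).1 = acc ++ pvA ls p := by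
  induction ls generalizing acc p with
  | nil => simp [pvA]
  | cons l ls ih =>
    by_cases hl : l.isEmpty
    · simp only [List.foldl_cons, pvSA, hl, if_true, pvA]
      have : ¬acc.isEmpty := by simpa using h
      cases p <;> simp [this, ih _ _ h]
    · simp only [List.foldl_cons, pvSA, hl, pvA]
      rw [ih _ _ (by simp)]
      cases p <;> simp

theorem pvFoldA0 (ls : List (List Char)) :
    (ls.foldl pvSA ([], false)).1 = pvA0 ls := by
  induction ls with
  | nil => simp [pvA0]
  | cons l ls ih =>
    by_cases hl : l.isEmpty
    · simp only [List.foldl_cons, pvSA, hl, if_true, pvA0]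
      simpa using ih
    · simp only [List.foldl_cons, pvSA, hl, pvA0]
      simp only [Bool.false_eq_true, if_false]
      rw [List.nil_append, pvFoldA_ne ls [l] false (by simp)]
      simp

theorem pvFoldB (ls : List (List Char)) (paras cur : List (List Char)) :
    (let st := ls.foldl pvStepB (paras, cur);
     if st.2.isEmpty then st.1 else st.1 ++ [PySem.Chars.join ['\n'] st.2]) =
    paras ++ pvB ls cur := by
  induction ls generalizing paras cur with
  | nil =>
    by_cases hc : cur.isEmpty <;> simp [pvB, hc]
  | cons l ls ih =>
    by_cases hl : l.isEmpty
    · by_cases hc : cur.isEmpty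
      · have : cur = [] := by simpa using hc
        subst this
        simp only [List.foldl_cons, pvStepB, hl, pvB]
        simpa using ih paras []
      · simp only [List.foldl_cons, pvStepB, hl, hc, pvB]
        simp only [Bool.not_true, Bool.not_false, if_true]
        rw [ih]
        simp
    · simp only [List.foldl_cons, pvStepB, hl, pvB]
      simp only [Bool.not_false, if_true]
      rw [ih]
      simp

-- all-blank characterisations
theorem pvA0_eq_nil_iff (ls : List (List Char)) :
    pvA0 ls = [] ↔ ∀ l ∈ ls, l.isEmpty := by
  induction ls with
  | nil => simp [pvA0]
  | cons l ls ih =>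
    by_cases hl : l.isEmpty
    · have hl' : l = [] := by simpa using hl
      simp [pvA0, ih, hl']
    · have hl' : l ≠ [] := by simpa using hl
      simp [pvA0, hl]
      intro h
      exact absurd h hl'

theorem pvB_ne_nil (ls : List (List Char)) (cur : List (List Char)) (hc : cur ≠ []) :
    pvB ls cur ≠ [] := by
  induction ls generalizing cur with
  | nil => simp [pvB, hc]
  | cons l ls ih =>
    by_cases hl : l.isEmpty
    · have hc' : ¬cur.isEmpty := by simpa using hc
      simp [pvB, hl, hc']
    · simp only [pvB, hl]
      exact ih (cur ++ [l]) (by simp)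

theorem pvB_nil_eq_nil_iff (ls : List (List Char)) :
    pvB ls [] = [] ↔ ∀ l ∈ ls, l.isEmpty := by
  induction ls with
  | nil => simp [pvB]
  | cons l ls ih =>
    by_cases hl : l.isEmpty
    · have hl' : l = [] := by simpa using hl
      simp [pvB, ih, hl']
    · have hl' : l ≠ [] := by simpa using hl
      simp [pvB, hl, pvB_ne_nil ls [l] (by simp)]
      intro h
      exact absurd h hl'

theorem pvA_true (ls : List (List Char)) :
    pvA ls true = if (pvA0 ls).isEmpty then [] else [] :: pvA0 ls := by
  induction ls with
  | nil => simp [pvA, pvA0]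
  | cons l ls ih =>
    by_cases hl : l.isEmpty
    · simp [pvA, pvA0, hl, ih]
    · simp [pvA, pvA0, hl]

-- join over a split list
theorem pvJoin_append (sep : List Char) (xs ys : List (List Char))
    (hx : xs ≠ []) (hy : ys ≠ []) :
    PySem.Chars.join sep (xs ++ ys) =
    PySem.Chars.join sep xs ++ sep ++ PySem.Chars.join sep ys := by
  induction xs with
  | nil => exact absurd rfl hx
  | cons x xs ih =>
    cases xs with
    | nil =>
      cases ys with
      | nil => exact absurd rfl hy
      | cons y ys => simp [PySem.Chars.join_singleton, PySem.Chars.join_cons_cons]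
    | cons x' xs' =>
      have h1 : (x' :: xs') ++ ys = x' :: (xs' ++ ys) := by simp
      rw [List.cons_append, h1, PySem.Chars.join_cons_cons]
      have h2 : x' :: (xs' ++ ys) = (x' :: xs') ++ ys := by simp
      rw [h2, ih (by simp), PySem.Chars.join_cons_cons]
      simp

-- the central identity: blank-separated lines joined by '\n' = paragraphs joined by '\n\n'
theorem pvMain (ls : List (List Char)) :
    (∀ cur, ¬cur.isEmpty →
      PySem.Chars.join ['\n', '\n'] (pvB ls cur) =
      PySem.Chars.join ['\n'] (cur ++ pvA ls false)) ∧
    PySem.Chars.join ['\n', '\n'] (pvB ls []) =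
      PySem.Chars.join ['\n'] (pvA0 ls) := by
  induction ls with
  | nil =>
    constructor
    · intro cur hc
      simp [pvB, pvA, hc]
    · simp [pvB, pvA0]
  | cons l ls ih =>
    have key : ∀ cur, ¬cur.isEmpty →
        PySem.Chars.join ['\n', '\n'] (pvB (l :: ls) cur) =
        PySem.Chars.join ['\n'] (cur ++ pvA (l :: ls) false) := by
      intro cur hc
      by_cases hl : l.isEmpty
      · simp only [pvB, pvA, hl, if_true, hc, if_false]
        rw [pvA_true]
        by_cases h0 : (pvA0 ls).isEmpty
        · have hb : pvB ls [] = [] := by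
            rw [pvB_nil_eq_nil_iff]
            exact (pvA0_eq_nil_iff ls).mp (by simpa using h0)
          simp [hb, h0, PySem.Chars.join_singleton]

        · have hb : pvB ls [] ≠ [] := by
            intro h
            exact h0 (by simp [(pvA0_eq_nil_iff ls).mpr ((pvB_nil_eq_nil_iff ls).mp h)])
          obtain ⟨q, qs, hq⟩ := List.exists_cons_of_ne_nil hb
          obtain ⟨a, as, ha⟩ := List.exists_cons_of_ne_nil (by simpa using h0 :
            pvA0 ls ≠ [])
          have hcur : cur ≠ [] := by simpa using hc
          rw [hq, PySem.Chars.join_cons_cons, ← hq, ih.2]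
          rw [if_neg h0]
          rw [pvJoin_append ['\n'] cur ([] :: pvA0 ls) hcur (by simp),
            ha, PySem.Chars.join_cons_cons]
          simp
      · simp [pvB, pvA, hl]
        rw [(ih.1 (cur ++ [l]) (by simp))]
        simp
    refine ⟨key, ?_⟩
    by_cases hl : l.isEmpty
    · simp only [pvB, pvA0, hl, if_true]
      exact ih.2
    · simp [pvB, pvA0, hl]
      rw [(ih.1 [l] (by simp))]
      simp

-- strip facts
theorem pvLstrip_head (y : List Char) (c : Char)
    (h : (PySem.Chars.lstrip y).head? = some c) : PySem.Chars.isspace c = false := by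
  induction y with
  | nil => simp [PySem.Chars.lstrip] at h
  | cons a t ih =>
    by_cases ha : PySem.Chars.isspace a
    · exact ih (by simpa [PySem.Chars.lstrip, List.dropWhile_cons, ha] using h)
    · simp [PySem.Chars.lstrip, ha] at h
      subst h
      simpa using ha

theorem pvRstrip_last (y : List Char) (c : Char)
    (h : (PySem.Chars.rstrip y).getLast? = some c) : PySem.Chars.isspace c = false := by
  have : (PySem.Chars.lstrip y.reverse).head? = some c := by
    simpa [PySem.Chars.rstrip, PySem.Chars.lstrip, List.getLast?_reverse] using h
  exact pvLstrip_head _ _ this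

theorem pvRstrip_head (y : List Char) (c : Char)
    (h : (PySem.Chars.rstrip y).head? = some c) : y.head? = some c := by
  have hpre : PySem.Chars.rstrip y <+: y := by
    have := List.dropWhile_suffix (l := y.reverse) (p := PySem.Chars.isspace)
    have := List.reverse_prefix.mpr this
    simpa [PySem.Chars.rstrip] using this
  obtain ⟨t, ht⟩ := hpre
  cases hr : PySem.Chars.rstrip y with
  | nil => simp [hr] at h
  | cons a as =>
    rw [hr] at ht
    rw [← ht]
    simp [hr] at h
    simp [h]

theorem pvStrip_head (y : List Char) (c : Char)
    (h : (PySem.Chars.strip y).head? = some c) : PySem.Chars.isspace c = false :=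
  pvLstrip_head y c (pvRstrip_head _ _ (by simpa [PySem.Chars.strip] using h))

theorem pvStrip_last (y : List Char) (c : Char)
    (h : (PySem.Chars.strip y).getLast? = some c) : PySem.Chars.isspace c = false :=
  pvRstrip_last _ c (by simpa [PySem.Chars.strip] using h)

theorem pvStrip_eq_self (cs : List Char)
    (hh : ∀ c, cs.head? = some c → PySem.Chars.isspace c = false)
    (hl : ∀ c, cs.getLast? = some c → PySem.Chars.isspace c = false) :
    PySem.Chars.strip cs = cs := by
  cases cs with
  | nil => rfl
  | cons a t =>
    have ha : PySem.Chars.isspace a = false := hh a rfl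
    have hls : PySem.Chars.lstrip (a :: t) = a :: t := by
      simp [PySem.Chars.lstrip, ha]
    rw [PySem.Chars.strip, hls]
    cases hr : (a :: t).reverse with
    | nil => simp at hr
    | cons b r =>
      have hb : PySem.Chars.isspace b = false := by
        apply hl
        rw [← List.head?_reverse, hr]; rfl
      rw [PySem.Chars.rstrip, hr, List.dropWhile_cons, if_neg (by simp [hb]),
        ← hr, List.reverse_reverse]

-- structure of A's stripped_lines: non-separator entries come from ls, ends are non-blank
theorem pvA_last (ls : List (List Char)) (p : Bool) (x : List Char)
    (h : (pvA ls p).getLast? = some x) : x ∈ ls ∧ x ≠ [] := by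
  induction ls generalizing p with
  | nil => simp [pvA] at h
  | cons l ls ih =>
    by_cases hl : l.isEmpty
    · rw [pvA.eq_def] at h
      simp only [] at h
      rw [if_pos hl] at h
      have := ih true h
      exact ⟨List.mem_cons_of_mem _ this.1, this.2⟩
    · rw [pvA.eq_def] at h
      simp only [] at h
      rw [if_neg hl] at h
      have h' : (l :: pvA ls false).getLast? = some x := by
        cases p
        · rw [if_neg Bool.false_ne_true, List.nil_append] at h
          exact h
        · rw [if_pos rfl] at h
          rw [show ([[]] : List (List Char)) ++ l :: pvA ls false =
            [] :: l :: pvA ls false from rfl, List.getLast?_cons_cons] at h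
          exact h
      cases hA : pvA ls false with
      | nil =>
        rw [hA] at h'
        have : x = l := by simp at h'; simp [h']
        subst this
        exact ⟨List.mem_cons_self, by simpa using hl⟩
      | cons q qs =>
        rw [hA, List.getLast?_cons_cons, ← hA] at h'
        have := ih false h'
        exact ⟨List.mem_cons_of_mem _ this.1, this.2⟩

theorem pvA0_last (ls : List (List Char)) (x : List Char)
    (h : (pvA0 ls).getLast? = some x) : x ∈ ls ∧ x ≠ [] := by
  induction ls with
  | nil => simp [pvA0] at h
  | cons l ls ih =>
    by_cases hl : l.isEmpty
    · rw [pvA0.eq_def] at h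
      simp only [] at h
      rw [if_pos hl] at h
      have := ih h
      exact ⟨List.mem_cons_of_mem _ this.1, this.2⟩
    · rw [pvA0.eq_def] at h
      simp only [] at h
      rw [if_neg hl] at h
      cases hA : pvA ls false with
      | nil =>
        rw [hA] at h
        have : x = l := by simp at h; simp [h]
        subst this
        exact ⟨List.mem_cons_self, by simpa using hl⟩
      | cons q qs =>
        rw [hA, List.getLast?_cons_cons, ← hA] at h
        have := pvA_last ls false x h
        exact ⟨List.mem_cons_of_mem _ this.1, this.2⟩

theorem pvA0_head (ls : List (List Char)) (x : List Char) (rest : List (List Char))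
    (h : pvA0 ls = x :: rest) : x ∈ ls ∧ x ≠ [] := by
  induction ls generalizing rest with
  | nil => simp [pvA0] at h
  | cons l ls ih =>
    by_cases hl : l.isEmpty
    · rw [pvA0.eq_def] at h
      simp only [] at h
      rw [if_pos hl] at h
      have := ih rest h
      exact ⟨List.mem_cons_of_mem _ this.1, this.2⟩
    · rw [pvA0.eq_def] at h
      simp only [] at h
      rw [if_neg hl] at h
      have : x = l := by
        have := congrArg List.head? h
        simpa using this.symm
      subst this
      exact ⟨List.mem_cons_self, by simpa using hl⟩

-- ends of the joined string
theorem pvJoin_head (sep : List Char) (l : List Char) (rest : List (List Char))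
    (hl : l ≠ []) : (PySem.Chars.join sep (l :: rest)).head? = l.head? := by
  cases rest with
  | nil => simp [PySem.Chars.join_singleton]
  | cons q qs =>
    rw [PySem.Chars.join_cons_cons]
    cases l with
    | nil => exact absurd rfl hl
    | cons a t => simp

theorem pvJoin_last (sep : List Char) (ys : List (List Char)) (x : List Char)
    (hx : x ≠ []) : (PySem.Chars.join sep (ys ++ [x])).getLast? = x.getLast? := by
  induction ys with
  | nil => simp [PySem.Chars.join_singleton]
  | cons y ys ih =>
    have h1 : (y :: ys) ++ [x] = y :: (ys ++ [x]) := by simp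
    rw [h1]
    cases hys : ys ++ [x] with
    | nil => simp at hys
    | cons q qs =>
      rw [PySem.Chars.join_cons_cons, ← hys]
      have hne : PySem.Chars.join sep (ys ++ [x]) ≠ [] := by
        intro hnil
        have hs : (PySem.Chars.join sep (ys ++ [x])).getLast?.isSome = true := by
          rw [ih]; exact List.getLast?_isSome.mpr hx
        rw [hnil] at hs
        simp at hs
      rw [List.getLast?_append_of_ne_nil _ hne, ih]

-- A's final strip is a no-op: the joined text starts and ends with a stripped non-blank line
theorem pvStripJoin (ls : List (List Char))
    (him : ∀ x ∈ ls, ∃ r : String, x = PySem.Chars.strip r.toList) :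
    PySem.Chars.strip (PySem.Chars.join ['\n'] (pvA0 ls)) =
    PySem.Chars.join ['\n'] (pvA0 ls) := by
  cases h0 : pvA0 ls with
  | nil => rfl
  | cons x rest =>
    have hx := pvA0_head ls x rest h0
    apply pvStrip_eq_self
    · intro c hc
      rw [pvJoin_head _ _ _ hx.2] at hc
      obtain ⟨r, hr⟩ := him x hx.1
      exact pvStrip_head r.toList c (by rw [← hr]; exact hc)
    · intro c hc
      have hne : (x :: rest).getLast?.isSome = true := List.getLast?_isSome.mpr (by simp)
      obtain ⟨y, hy⟩ := Option.isSome_iff_exists.mp hne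
      have hyl := pvA0_last ls y (by rw [h0]; exact hy)
      obtain ⟨ys, hys⟩ := List.getLast?_eq_some_iff.mp hy
      rw [hys, pvJoin_last _ _ _ hyl.2] at hc
      obtain ⟨r, hr⟩ := him y hyl.1
      exact pvStrip_last r.toList c (by rw [← hr]; exact hc)

-- ===== VERDICT (by name: the statement is the Claim_ definition above) =====
theorem normalize_fmg_text_py_spec : Claim_equal_normalize_fmg_text_py := by
  intro value _
  simp only [Spec_normalize_fmg_text_py, normalize_fmg_text_py, normalize_fmg_text_py_alt]
  have hAfold : (PySem.Str.splitlines value).foldl pvStepA ([], false) =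
      ((PySem.Str.splitlines value).map
        (fun line => PySem.Chars.strip line.toList)).foldl pvSA ([], false) := by
    rw [List.foldl_map]
    rfl
  have hB := pvFoldB ((PySem.Str.splitlines value).map
    (fun line => PySem.Chars.strip line.toList)) [] []
  simp only [List.nil_append] at hB
  rw [hB, hAfold, pvFoldA0, (pvMain _).2]
  congr 1
  apply pvStripJoin
  intro x hx
  obtain ⟨r, _, hr⟩ := List.mem_map.mp hx
  exact ⟨r, hr.symm⟩
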